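-- pv_equiv track=rewrite | github.com/MizuRyu/translate-oss-docstring-actions | src/libcst_extractor/apply.py | _wrap_comment_text
-- ===== SOURCE A (Python) =====
-- import textwrap
-- from typing import Any, Dict, Iterable, List, Optional, Sequence, Tuple
--
-- def _wrap_comment_text(text: str, indent: str, width: int) -> List[str]:
--     paragraphs: List[str] = []
--     buffer: List[str] = []
--     for raw_line in text.split("\n"):
--         if raw_line.strip():
--             buffer.append(raw_line.strip())
--         else:
--             if buffer:
--                 paragraphs.append(" ".join(buffer))
--                 buffer = []
--             paragraphs.append("")
--     if buffer:
--         paragraphs.append(" ".join(buffer))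
--     if not paragraphs:
--         paragraphs = [""]
--
--     wrapped: List[str] = []
--     for paragraph in paragraphs:
--         if not paragraph:
--             wrapped.append(f"{indent}#")
--             continue
--         lines = _wrap_paragraph(paragraph, width)
--         if not lines:
--             wrapped.append(f"{indent}#")
--             continue
--         wrapped.extend(f"{indent}# {line}" if line else f"{indent}#" for line in lines)
--     return wrapped
--
-- def _wrap_paragraph(paragraph: str, width: int) -> List[str]:
--     if not paragraph:
--         return [""]
--     wrapper = textwrap.TextWrapper(
--         width=width,
--         break_long_words=False,
--         break_on_hyphens=False,
--     )
--     lines = wrapper.wrap(paragraph)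
--     if not lines:
--         lines = [paragraph]
--     result: List[str] = []
--     for line in lines:
--         if len(line) <= width:
--             result.append(line)
--             continue
--         result.extend(line[i : i + width] for i in range(0, len(line), width))
--     return result
-- ===== SOURCE B (Python) =====
-- from typing import List
--
--
-- def _wrap_comment_text(text: str, indent: str, width: int) -> List[str]:
--     # Index scan over the pre-stripped lines: blank lines emit "#" directly, maximal
--     # non-blank runs are joined and filled by a hand-written greedy wrapper (no textwrap).
--     stripped = [line.strip() for line in text.split("\n")]
--     out: List[str] = []
--     i = 0
--     while i < len(stripped):
--         if not stripped[i]: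
--             out.append(f"{indent}#")
--             i += 1
--         else:
--             j = i
--             while j < len(stripped) and stripped[j]:
--                 j += 1
--             for line in _fill(" ".join(stripped[i:j]), width):
--                 out.append(f"{indent}# {line}")
--             i = j
--     return out
--
--
-- def _fill(paragraph: str, width: int) -> List[str]:
--     # Greedy word-wrap equivalent to textwrap.TextWrapper(width, break_long_words=False,
--     # break_on_hyphens=False).wrap followed by char-chunking of over-wide lines, fused:
--     # inter-word whitespace runs are preserved inside a line, dropped at line breaks.
--     munged = "".join(" " if c in " \t\n\v\f\r" else c for c in paragraph.expandtabs())
--     toks = []  # (number of spaces before word, word)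
--     gap = 0
--     word = ""
--     for c in munged:
--         if c == " ":
--             if word:
--                 toks.append((gap, word))
--                 word = ""
--                 gap = 1
--             else:
--                 gap += 1
--         else:
--             word += c
--     if word:
--         toks.append((gap, word))
--
--     res: List[str] = []
--     k = 0
--     while k < len(toks):
--         w = toks[k][1]
--         k += 1
--         if len(w) > width:
--             res.extend(w[m:m + width] for m in range(0, len(w), width))
--             continue
--         parts = [w]
--         cur = len(w)
--         while k < len(toks):
--             g, nxt = toks[k]
--             if cur + g + len(nxt) > width:
--                 break
--             parts.append(" " * g + nxt)
--             cur += g + len(nxt)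
--             k += 1
--         res.append("".join(parts))
--     return res
-- ===== Notes on version B (the rewrite author's own statement) =====
-- stated objective: alternative
-- what changed: B drops textwrap entirely: an index two-pointer scan over the pre-stripped lines replaces A's buffer-accumulating loop plus intermediate paragraphs list, and a hand-written single-pass greedy word/gap wrapper (tokens = (gap,word) pairs, over-wide words char-chunked in place) replaces A's textwrap.TextWrapper call followed by a separate char-chunking pass.
import Mathlib
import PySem

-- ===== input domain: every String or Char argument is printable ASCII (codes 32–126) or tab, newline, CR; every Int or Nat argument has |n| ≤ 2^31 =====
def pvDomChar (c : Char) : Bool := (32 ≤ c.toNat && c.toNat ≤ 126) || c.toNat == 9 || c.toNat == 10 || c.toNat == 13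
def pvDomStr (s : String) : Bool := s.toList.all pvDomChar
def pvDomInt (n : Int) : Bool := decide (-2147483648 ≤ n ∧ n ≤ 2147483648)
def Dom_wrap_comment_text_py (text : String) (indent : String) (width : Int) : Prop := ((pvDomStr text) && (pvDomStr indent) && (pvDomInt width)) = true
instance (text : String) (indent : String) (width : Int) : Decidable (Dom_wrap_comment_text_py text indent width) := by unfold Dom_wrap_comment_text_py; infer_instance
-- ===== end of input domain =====

-- B drops textwrap entirely: an index scan over the pre-stripped lines plus a
-- hand-written greedy word wrapper (word/gap tokens, long-word chunking fused in).

-- ===== SHARED HELPERS (A's textwrap.TextWrapper subset is hand-ported below, exact on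
-- the admitted character set; B's Python computes paragraph.expandtabs() and the same
-- whitespace→space translation explicitly, so twExpandTabs/twIsWS/twMunge serve both) =====

-- text.split("\n") (separator non-empty, so split? is always `some`)
def pyLines (text : String) : List String := (PySem.Str.split? text "\n").getD []

-- str.expandtabs(8): pad to the next multiple of 8; '\n'/'\r' reset the column
def twExpandTabs : List Char → Nat → List Char
  | [], _ => []
  | c :: rest, col =>
    if c = '\t' then
      let pad := 8 - col % 8
      List.replicate pad ' ' ++ twExpandTabs rest (col + pad)
    else if c = '\n' ∨ c = '\r' then c :: twExpandTabs rest 0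
    else c :: twExpandTabs rest (col + 1)

-- Python str whitespace translated to ' ' by TextWrapper (replace_whitespace)
def twIsWS (c : Char) : Bool :=
  c == ' ' || c == '\t' || c == '\n' || c == '\r' || c == '\u000B' || c == '\u000C'

-- TextWrapper._munge_whitespace: expand tabs, then map whitespace to ' '
def twMunge (cs : List Char) : List Char :=
  (twExpandTabs cs 0).map (fun c => if twIsWS c then ' ' else c)

-- ===== PORT A =====

-- TextWrapper._split with break_on_hyphens=False: split on runs of whitespace,
-- keeping the separators (after twMunge every whitespace char is ' ', so the
-- regex classes are exactly `= ' '` vs `≠ ' '`)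
def twChunks : List Char → List (List Char)
  | [] => []
  | c :: rest =>
    match twChunks rest with
    | (d :: ds) :: gs =>
      if (c == ' ') == (d == ' ') then (c :: d :: ds) :: gs
      else [c] :: (d :: ds) :: gs
    | gs => [c] :: gs

-- the inner greedy loop of _wrap_chunks: take chunks while cur_len + len ≤ width
def twGreedy (width : Int) : List (List Char) → Int → List (List Char) × List (List Char)
  | [], _ => ([], [])
  | c :: rest, curLen =>
    if curLen + (c.length : Int) ≤ width then
      let g := twGreedy width rest (curLen + (c.length : Int))
      (c :: g.1, g.2)
    else ([], c :: rest)

-- the outer loop of _wrap_chunks (drop_whitespace=True, break_long_words=False,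
-- max_lines=None); each iteration consumes ≥ 1 chunk, so fuel = #chunks + 1 suffices
def twWrapGo (width : Int) : Nat → List (List Char) → List String → List String
  | 0, _, lines => lines
  | _ + 1, [], lines => lines
  | fuel + 1, c :: rest, lines =>
    -- drop a leading whitespace chunk (only once lines is non-empty)
    let chunks := if !lines.isEmpty && (PySem.Chars.strip c).isEmpty then rest else c :: rest
    let g := twGreedy width chunks 0
    -- _handle_long_word with break_long_words=False: a too-long head chunk goes
    -- alone onto the (empty) current line
    let cr : List (List Char) × List (List Char) :=
      match g with
      | (cur, r :: rs) => if width < (r.length : Int) && cur.isEmpty then ([r], rs) else (cur, r :: rs)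
      | (cur, []) => (cur, [])
    -- drop a trailing whitespace chunk of the current line
    let cur := match cr.1.getLast? with
      | some last => if (PySem.Chars.strip last).isEmpty then cr.1.dropLast else cr.1
      | none => cr.1
    let lines := if !cur.isEmpty then lines ++ [String.ofList cur.flatten] else lines
    twWrapGo width fuel cr.2 lines

-- the per-line body of _wrap_paragraph's result loop (append, or char-chunk a long line)
def twPieces (width : Int) (line : String) : List String :=
  if PySem.Str.len line ≤ width then [line]
  else (PySem.List.pyRange 0 (PySem.Str.len line) width).map
    (fun i => PySem.Str.slice line (some i) (some (i + width)))

-- _wrap_paragraph(paragraph, width)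
def wrapParagraph (paragraph : String) (width : Int) : List String :=
  if paragraph = "" then [""]
  else
    let chunks := twChunks (twMunge paragraph.toList)
    let lines := twWrapGo width (chunks.length + 1) chunks []
    let lines := if lines = [] then [paragraph] else lines
    lines.foldl (fun result line => result ++ twPieces width line) []

-- " ".join(buffer)
def joinBuf (buf : List String) : String := PySem.Str.join " " buf

-- f"{indent}# {line}" if line else f"{indent}#"
def wrapLine (indent : String) (line : String) : String :=
  if line ≠ "" then indent ++ "# " ++ line else indent ++ "#"

-- `if buffer: paragraphs.append(" ".join(buffer))`
def flushP (buf : List String) : List String := if buf ≠ [] then [joinBuf buf] else []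

-- body of A's first loop, state = (paragraphs, buffer)
def stepA (pb : List String × List String) (raw_line : String) : List String × List String :=
  if PySem.Str.strip raw_line ≠ "" then (pb.1, pb.2 ++ [PySem.Str.strip raw_line])
  else (pb.1 ++ flushP pb.2 ++ [""], [])

-- body of A's second loop for one paragraph
def emitParaA (indent : String) (width : Int) (p : String) : List String :=
  if p = "" then [indent ++ "#"]
  else
    let lines := wrapParagraph p width
    if lines = [] then [indent ++ "#"]
    else lines.map (wrapLine indent)

def wrap_comment_text_py (text : String) (indent : String) (width : Int) : List String :=
  let pb := (pyLines text).foldl stepA ([], [])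
  let paragraphs := pb.1 ++ flushP pb.2
  let paragraphs := if paragraphs = [] then [""] else paragraphs
  paragraphs.foldl (fun wrapped p => wrapped ++ emitParaA indent width p) []

-- ===== PORT B =====

-- B's token scanner: one pass over the munged characters, producing
-- (number of spaces before the word, word) pairs
def bToks : List Char → Nat → List Char → List (Nat × List Char)
  | [], gap, word => if word ≠ [] then [(gap, word)] else []
  | c :: cs, gap, word =>
    if c = ' ' then
      if word ≠ [] then (gap, word) :: bToks cs 1 []
      else bToks cs (gap + 1) []
    else bToks cs gap (word ++ [c])

-- B's inner while loop: absorb following tokens while the line still fits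
def bInner (width : Int) : List (Nat × List Char) → Int → List (List Char) × List (Nat × List Char)
  | [], _ => ([], [])
  | (g, nxt) :: rest, cur =>
    if width < cur + (g : Int) + (nxt.length : Int) then ([], (g, nxt) :: rest)
    else
      let r := bInner width rest (cur + (g : Int) + (nxt.length : Int))
      ((List.replicate g ' ' ++ nxt) :: r.1, r.2)

theorem bInner_snd_length_le (width : Int) :
    ∀ (ts : List (Nat × List Char)) (cur : Int), (bInner width ts cur).2.length ≤ ts.length := by
  intro ts
  induction ts with
  | nil => intro cur; simp [bInner]
  | cons t rest ih =>
    intro cur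
    obtain ⟨g, nxt⟩ := t
    rw [bInner]
    split
    · simp
    · exact le_trans (ih _) (by simp)

-- w[m:m+width] for m in range(0, len(w), width)
def bChunkWord (width : Int) (w : List Char) : List String :=
  (PySem.List.pyRange 0 (w.length : Int) width).map
    (fun m => String.ofList (PySem.List.slice w (some m) (some (m + width))))

-- B's outer while loop over the tokens
def bGreedy (width : Int) : List (Nat × List Char) → List String
  | [] => []
  | (_, w) :: rest =>
    if width < (w.length : Int) then bChunkWord width w ++ bGreedy width rest
    else
      let r := bInner width rest (w.length : Int)
      String.ofList (w :: r.1).flatten :: bGreedy width r.2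
termination_by ts => ts.length
decreasing_by
  · simp
  · have := bInner_snd_length_le width rest (w.length : Int)
    simp only [List.length_cons]
    omega

-- _fill(paragraph, width)
def bFill (paragraph : String) (width : Int) : List String :=
  bGreedy width (bToks (twMunge paragraph.toList) 0 [])

-- B's index scan over the stripped lines (run extraction = the inner j-loop)
def bScan (indent : String) (width : Int) : List String → List String
  | [] => []
  | s :: rest =>
    if s = "" then (indent ++ "#") :: bScan indent width rest
    else
      ((bFill (PySem.Str.join " " ((s :: rest).takeWhile (· ≠ ""))) width).map
        (fun l => indent ++ "# " ++ l)) ++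
      bScan indent width ((s :: rest).dropWhile (· ≠ ""))
termination_by ls => ls.length
decreasing_by
  · simp
  · rename_i hs
    have h1 : List.dropWhile (fun x => decide (x ≠ "")) (s :: rest) =
        List.dropWhile (fun x => decide (x ≠ "")) rest := by
      simp [List.dropWhile_cons, hs]
    rw [h1]
    have := List.length_dropWhile_le (fun x => decide (x ≠ "")) rest
    simp only [List.length_cons]
    omega

def wrap_comment_text_py_alt (text : String) (indent : String) (width : Int) : List String :=
  bScan indent width ((pyLines text).map PySem.Str.strip)

-- ===== PRECONDITION & SPEC =====
-- A raises ValueError (textwrap refuses width ≤ 0) exactly when width < 1 and some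
-- line of the text is non-blank; Pre_ excludes exactly those inputs.
def Pre_wrap_comment_text_py (text : String) (indent : String) (width : Int) : Prop :=
  1 ≤ width ∨ ∀ l ∈ (PySem.Str.split? text "\n").getD [], PySem.Str.strip l = ""
instance (text : String) (indent : String) (width : Int) : Decidable (Pre_wrap_comment_text_py text indent width) := by unfold Pre_wrap_comment_text_py; infer_instance

def pvWitness_wrap_comment_text_py : String × String × Int := ("hello world\n\nsecond para", "  ", 8)

def Spec_wrap_comment_text_py (text : String) (indent : String) (width : Int) (out : List String) : Prop := out = wrap_comment_text_py_alt text indent width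
instance (text : String) (indent : String) (width : Int) (out : List String) : Decidable (Spec_wrap_comment_text_py text indent width out) := by unfold Spec_wrap_comment_text_py; infer_instance

-- ===== CLAIM (what is proved, stated in full; the proofs are below) =====
def Claim_equal_wrap_comment_text_py : Prop := ∀ (text : String) (indent : String) (width : Int), Dom_wrap_comment_text_py text indent width → Pre_wrap_comment_text_py text indent width → Spec_wrap_comment_text_py text indent width (wrap_comment_text_py text indent width)

-- ===== LEMMAS AND PROOFS =====

-- ---------- token-level vocabulary ----------

def WordOK (w : List Char) : Prop := w ≠ [] ∧ ∀ c ∈ w, PySem.Chars.isspace c = false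

def TokOK (t : Nat × List Char) : Prop := 1 ≤ t.1 ∧ WordOK t.2

-- the characters a token list denotes
def flatT (ts : List (Nat × List Char)) : List Char :=
  ts.flatMap (fun t => List.replicate t.1 ' ' ++ t.2)

-- the chunk list (textwrap's view) of a token list whose gaps are all ≥ 1
def chunksT (ts : List (Nat × List Char)) : List (List Char) :=
  ts.flatMap (fun t => [List.replicate t.1 ' ', t.2])

def tokLen (ts : List (Nat × List Char)) : Int :=
  (ts.map (fun t => (t.1 : Int) + (t.2.length : Int))).sum

-- A's wrapped lines (before the char-chunking pass), token level
def aGreedy (width : Int) : List (Nat × List Char) → List String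
  | [] => []
  | (_, w) :: rest =>
    if width < (w.length : Int) then String.ofList w :: aGreedy width rest
    else
      String.ofList (w :: (bInner width rest (w.length : Int)).1).flatten ::
        aGreedy width (bInner width rest (w.length : Int)).2
termination_by ts => ts.length
decreasing_by
  · simp
  · have := bInner_snd_length_le width rest (w.length : Int)
    simp only [List.length_cons]
    omega

-- ---------- basic character facts ----------

theorem isspace_of_twIsWS (c : Char) (h : twIsWS c = true) : PySem.Chars.isspace c = true := by
  simp only [twIsWS, Bool.or_eq_true, beq_iff_eq] at h
  rcases h with ((((h | h) | h) | h) | h) | h <;> subst h <;> decide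

theorem not_twIsWS_of_not_isspace (c : Char) (h : PySem.Chars.isspace c = false) : twIsWS c = false := by
  by_contra hc
  rw [Bool.not_eq_false] at hc
  rw [isspace_of_twIsWS c hc] at h
  exact absurd h (by decide)

theorem isspace_false_of_dom (c : Char) (hdom : pvDomChar c = true) (h : twIsWS c = false) :
    PySem.Chars.isspace c = false := by
  by_contra hc
  rw [Bool.not_eq_false] at hc
  simp only [twIsWS, Bool.or_eq_false_iff, beq_eq_false_iff_ne, ne_eq] at h
  obtain ⟨⟨⟨⟨⟨h1, h2⟩, h3⟩, h4⟩, h5⟩, h6⟩ := h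
  simp only [pvDomChar, Bool.or_eq_true, Bool.and_eq_true, beq_iff_eq,
    decide_eq_true_eq] at hdom
  simp only [PySem.Chars.isspace, Bool.or_eq_true, Bool.and_eq_true,
    decide_eq_true_eq] at hc
  have e1 : c ≠ ' ' := h1
  have e2 : c ≠ '\t' := h2
  have e3 : c ≠ '\n' := h3
  have e4 : c ≠ '\r' := h4
  have n1 : c.toNat ≠ 32 := fun hn => e1 (Char.eq_of_val_eq (by
    have : c.val.toNat = 32 := hn
    exact UInt32.toNat_inj.mp (by simpa using this)))
  have n2 : c.toNat ≠ 9 := fun hn => e2 (Char.eq_of_val_eq (by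
    have : c.val.toNat = 9 := hn
    exact UInt32.toNat_inj.mp (by simpa using this)))
  have n3 : c.toNat ≠ 10 := fun hn => e3 (Char.eq_of_val_eq (by
    have : c.val.toNat = 10 := hn
    exact UInt32.toNat_inj.mp (by simpa using this)))
  have n4 : c.toNat ≠ 13 := fun hn => e4 (Char.eq_of_val_eq (by
    have : c.val.toNat = 13 := hn
    exact UInt32.toNat_inj.mp (by simpa using this)))
  omega

theorem strip_replicate_space (g : Nat) : PySem.Chars.strip (List.replicate g ' ') = [] := by
  have h : List.dropWhile PySem.Chars.isspace (List.replicate g ' ') = [] := by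
    rw [List.dropWhile_eq_nil_iff]
    intro x hx
    rw [List.eq_of_mem_replicate hx]
    decide
  simp [PySem.Chars.strip, PySem.Chars.lstrip, PySem.Chars.rstrip, h]

theorem dropWhile_isspace_of_all {l : List Char} (h : ∀ c ∈ l, PySem.Chars.isspace c = false) :
    List.dropWhile PySem.Chars.isspace l = l := by
  cases l with
  | nil => rfl
  | cons a t => exact List.dropWhile_cons_of_neg (by simp [h a (by simp)])

theorem strip_wordOK {w : List Char} (hw : WordOK w) : (PySem.Chars.strip w).isEmpty = false := by
  obtain ⟨hne, hall⟩ := hw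
  have h1 : PySem.Chars.strip w = w := by
    unfold PySem.Chars.strip PySem.Chars.lstrip PySem.Chars.rstrip
    rw [dropWhile_isspace_of_all hall,
      dropWhile_isspace_of_all (fun c hc => hall c (List.mem_reverse.mp hc)),
      List.reverse_reverse]
  rw [h1]
  simpa using hne

-- ---------- expandtabs / munge facts ----------

theorem twExpandTabs_ne_nil (cs : List Char) (col : Nat) (h : cs ≠ []) : twExpandTabs cs col ≠ [] := by
  cases cs with
  | nil => exact absurd rfl h
  | cons c rest =>
    rw [twExpandTabs]
    split
    · intro hcontra
      have hlen := congrArg List.length hcontra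
      simp only [List.length_append, List.length_replicate, List.length_nil] at hlen
      omega
    · split <;> simp

theorem twExpandTabs_mem (cs : List Char) (col : Nat) (c : Char) (h : c ∈ twExpandTabs cs col) :
    c = ' ' ∨ c ∈ cs := by
  induction cs generalizing col with
  | nil => simp [twExpandTabs] at h
  | cons d rest ih =>
    rw [twExpandTabs] at h
    split at h
    · rcases List.mem_append.mp h with h1 | h1
      · exact Or.inl (List.eq_of_mem_replicate h1)
      · rcases ih _ h1 with h2 | h2
        · exact Or.inl h2
        · exact Or.inr (List.mem_cons_of_mem _ h2)
    · split at h <;>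
      · rcases List.mem_cons.mp h with h1 | h1
        · exact Or.inr (h1 ▸ List.mem_cons_self)
        · rcases ih _ h1 with h2 | h2
          · exact Or.inl h2
          · exact Or.inr (List.mem_cons_of_mem _ h2)

theorem twExpandTabs_head (c : Char) (cs : List Char) (col : Nat) (h : twIsWS c = false) :
    (twExpandTabs (c :: cs) col).head? = some c := by
  simp only [twIsWS, Bool.or_eq_false_iff, beq_eq_false_iff_ne, ne_eq] at h
  rw [twExpandTabs]
  rw [if_neg h.1.1.1.1.2, if_neg (by push_neg; exact ⟨h.1.1.1.2, h.1.1.2⟩)]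
  rfl

theorem twExpandTabs_getLast (cs : List Char) (col : Nat) (hne : cs ≠ [])
    (h : ∀ c, cs.getLast? = some c → twIsWS c = false) :
    (twExpandTabs cs col).getLast? = cs.getLast? := by
  induction cs generalizing col with
  | nil => exact absurd rfl hne
  | cons c rest ih =>
    cases rest with
    | nil =>
      have hc : twIsWS c = false := h c rfl
      simp only [twIsWS, Bool.or_eq_false_iff, beq_eq_false_iff_ne, ne_eq] at hc
      rw [twExpandTabs]
      rw [if_neg hc.1.1.1.1.2, if_neg (by push_neg; exact ⟨hc.1.1.1.2, hc.1.1.2⟩)]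
      rfl
    | cons d rest' =>
      have hrec : ∀ col', (twExpandTabs (d :: rest') col').getLast? = (d :: rest').getLast? :=
        fun col' => ih col' (by simp) (fun x hx => h x (by rw [List.getLast?_cons_cons]; exact hx))
      have hne2 : ∀ col', twExpandTabs (d :: rest') col' ≠ [] :=
        fun col' => twExpandTabs_ne_nil _ _ (by simp)
      rw [twExpandTabs]
      split
      · rw [List.getLast?_append_of_ne_nil _ (hne2 _), hrec, List.getLast?_cons_cons]
      · split <;>
        · rw [show ∀ (x : Char) (l : List Char), x :: l = [x] ++ l from fun _ _ => rfl,
            List.getLast?_append_of_ne_nil _ (hne2 _), hrec, List.getLast?_cons_cons]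

theorem twMunge_ws_eq_space (l : List Char) (hdom : ∀ c ∈ l, pvDomChar c = true) :
    ∀ c ∈ twMunge l, PySem.Chars.isspace c = true → c = ' ' := by
  intro c hc hsp
  unfold twMunge at hc
  obtain ⟨d, hd, hdc⟩ := List.mem_map.mp hc
  by_cases hws : twIsWS d = true
  · rw [if_pos hws] at hdc; exact hdc.symm
  · rw [Bool.not_eq_true] at hws
    rw [if_neg (by simp [hws])] at hdc
    subst hdc
    rcases twExpandTabs_mem l 0 d hd with h1 | h1
    · exact h1
    · rw [isspace_false_of_dom d (hdom d h1) hws] at hsp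
      exact absurd hsp (by decide)

theorem twMunge_ne_nil (l : List Char) (h : l ≠ []) : twMunge l ≠ [] := by
  unfold twMunge
  simp [twExpandTabs_ne_nil l 0 h]

theorem twMunge_head (c : Char) (l : List Char) (h : PySem.Chars.isspace c = false) :
    (twMunge (c :: l)).head? = some c := by
  have hws := not_twIsWS_of_not_isspace c h
  unfold twMunge
  rw [List.head?_map, twExpandTabs_head c l 0 hws]
  simp [hws]

theorem twMunge_getLast (l : List Char) (hne : l ≠ [])
    (h : ∀ c, l.getLast? = some c → PySem.Chars.isspace c = false) :
    (twMunge l).getLast? = l.getLast? := by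
  unfold twMunge
  rw [List.getLast?_map, twExpandTabs_getLast l 0 hne
    (fun c hc => not_twIsWS_of_not_isspace c (h c hc))]
  cases hl : l.getLast? with
  | none => exact absurd (List.getLast?_eq_none_iff.mp hl) hne
  | some c => simp [not_twIsWS_of_not_isspace c (h c hl)]

-- ---------- existence of the token decomposition (G3) ----------

theorem head_dropWhile_false {α : Type} (p : α → Bool) :
    ∀ (l : List α) (a : α) (t : List α), List.dropWhile p l = a :: t → p a = false := by
  intro l
  induction l with
  | nil => intro a t h; simp at h
  | cons c l' ih =>
    intro a t h
    rw [List.dropWhile_cons] at h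
    split at h
    · exact ih a t h
    · rename_i hpc
      injection h with h1 h2
      subst h1
      simpa using hpc

theorem toks_exist (m : List Char) (hne : m ≠ [])
    (hws : ∀ c ∈ m, PySem.Chars.isspace c = true → c = ' ')
    (hh : ∀ c, m.head? = some c → c ≠ ' ')
    (hl : ∀ c, m.getLast? = some c → c ≠ ' ') :
    ∃ w tl, m = w ++ flatT tl ∧ WordOK w ∧ (∀ t ∈ tl, TokOK t) := by
  suffices H : ∀ (n : Nat) (m : List Char), m.length ≤ n → m ≠ [] →
      (∀ c ∈ m, PySem.Chars.isspace c = true → c = ' ') →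
      (∀ c, m.head? = some c → c ≠ ' ') →
      (∀ c, m.getLast? = some c → c ≠ ' ') →
      ∃ w tl, m = w ++ flatT tl ∧ WordOK w ∧ (∀ t ∈ tl, TokOK t) by
    exact H m.length m le_rfl hne hws hh hl
  intro n
  induction n with
  | zero =>
    intro m hlen hne _ _ _
    cases m with
    | nil => exact absurd rfl hne
    | cons a t => simp at hlen
  | succ n ih =>
    intro m hlen hne hws hh hl
    have hsplit : m.takeWhile (fun c => c != ' ') ++ m.dropWhile (fun c => c != ' ') = m :=
      List.takeWhile_append_dropWhile
    set w := m.takeWhile (fun c => c != ' ') with hw_def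
    set r := m.dropWhile (fun c => c != ' ') with hr_def
    have hwne : w ≠ [] := by
      cases m with
      | nil => exact absurd rfl hne
      | cons a t =>
        have ha : a ≠ ' ' := hh a rfl
        rw [hw_def, List.takeWhile_cons_of_pos (by simp [ha])]
        simp
    have hwchar : ∀ c ∈ w, c ≠ ' ' := by
      intro c hc
      have := List.mem_takeWhile_imp hc
      simpa using this
    have hwmem : ∀ c ∈ w, c ∈ m := fun c hc => (List.takeWhile_prefix _).subset hc
    have hwOK : WordOK w := by
      refine ⟨hwne, fun c hc => ?_⟩
      by_contra hb
      rw [Bool.not_eq_false] at hb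
      exact hwchar c hc (hws c (hwmem c hc) hb)
    cases hr : r with
    | nil =>
      refine ⟨w, [], ?_, hwOK, by simp⟩
      have : flatT [] = ([] : List Char) := rfl
      rw [this, List.append_nil, ← hsplit, hr, List.append_nil]
    | cons a r1 =>
      have ha : a = ' ' := by
        have := head_dropWhile_false (fun c => c != ' ') m a r1 (hr_def ▸ hr)
        simpa using this
      have hrne : r ≠ [] := by rw [hr]; simp
      have hrsplit : r.takeWhile (fun c => c == ' ') ++ r.dropWhile (fun c => c == ' ') = r :=
        List.takeWhile_append_dropWhile
      set sp := r.takeWhile (fun c => c == ' ') with hsp_def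
      set m' := r.dropWhile (fun c => c == ' ') with hm'_def
      have hspall : ∀ c ∈ sp, c = ' ' := by
        intro c hc
        have := List.mem_takeWhile_imp hc
        simpa using this
      have hspne : sp ≠ [] := by
        rw [hsp_def, hr, ha, List.takeWhile_cons_of_pos (by simp)]
        simp
      have hsprep : sp = List.replicate sp.length ' ' := List.eq_replicate_of_mem hspall
      have hg1 : 1 ≤ sp.length := by
        cases hspc : sp with
        | nil => exact absurd hspc hspne
        | cons x xs => simp [hspc]
      have hlastm : m.getLast? = r.getLast? := by
        rw [← hsplit, List.getLast?_append_of_ne_nil _ hrne]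
      have hm'ne : m' ≠ [] := by
        intro hcon
        have hreq : r = sp := by rw [← hrsplit, hcon, List.append_nil]
        obtain ⟨c, hc⟩ : ∃ c, r.getLast? = some c :=
          ⟨r.getLast hrne, List.getLast?_eq_getLast_of_ne_nil hrne⟩
        have hcm : c = ' ' := hspall c (by rw [← hreq]; exact List.mem_of_getLast? hc)
        exact hl c (by rw [hlastm]; exact hc) hcm
      have hm'len : m'.length ≤ n := by
        have h1 : r.length ≤ n := by
          have h2 := congrArg List.length hsplit
          simp only [List.length_append] at h2
          have hw1 : 1 ≤ w.length := by
            cases hwc : w with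
            | nil => exact absurd hwc hwne
            | cons x xs => simp [hwc]
          omega
        have h2 : m'.length ≤ r.length :=
          hm'_def ▸ List.length_dropWhile_le (fun c => c == ' ') r
        omega
      have hm'mem : ∀ c ∈ m', c ∈ m := by
        intro c hc
        have h1 : c ∈ r := (List.dropWhile_suffix _).subset hc
        rw [← hsplit]
        exact List.mem_append.mpr (Or.inr h1)
      have hm'h : ∀ c, m'.head? = some c → c ≠ ' ' := by
        intro c hc
        cases hm'c : m' with
        | nil => rw [hm'c] at hc; simp at hc
        | cons b t =>
          rw [hm'c] at hc
          simp only [List.head?_cons, Option.some.injEq] at hc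
          subst hc
          have := head_dropWhile_false (fun c => c == ' ') r b t (hm'_def ▸ hm'c)
          simpa using this
      have hm'l : ∀ c, m'.getLast? = some c → c ≠ ' ' := by
        intro c hc
        apply hl c
        rw [hlastm, ← hrsplit, List.getLast?_append_of_ne_nil _ hm'ne]
        exact hc
      obtain ⟨w1, tl1, heq, hw1OK, htl1⟩ := ih m' hm'len hm'ne
        (fun c hc h => hws c (hm'mem c hc) h) hm'h hm'l
      refine ⟨w, (sp.length, w1) :: tl1, ?_, hwOK, ?_⟩
      · have hfl : flatT ((sp.length, w1) :: tl1) =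
            List.replicate sp.length ' ' ++ (w1 ++ flatT tl1) := by simp [flatT]
        rw [hfl, ← heq, ← hsprep, hrsplit, hsplit]
      · intro t ht
        rcases List.mem_cons.mp ht with h1 | h1
        · subst h1; exact ⟨hg1, hw1OK⟩
        · exact htl1 t h1

-- ---------- B's scanner on a token decomposition (G1) ----------

theorem ne_space_of_isspace_false {c : Char} (h : PySem.Chars.isspace c = false) : c ≠ ' ' := by
  intro hc
  subst hc
  exact absurd h (by decide)

theorem bToks_spaces (k : Nat) (rest : List Char) (gap : Nat) :
    bToks (List.replicate k ' ' ++ rest) gap [] = bToks rest (gap + k) [] := by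
  induction k generalizing gap with
  | zero => simp
  | succ n ih =>
    have h1 : bToks (' ' :: (List.replicate n ' ' ++ rest)) gap [] =
        bToks (List.replicate n ' ' ++ rest) (gap + 1) [] := by
      rw [bToks]
      simp
    rw [List.replicate_succ, List.cons_append, h1, ih]
    rw [show gap + 1 + n = gap + (n + 1) from by omega]

theorem bToks_word (w : List Char) (hw : ∀ c ∈ w, c ≠ ' ') (rest : List Char) (gap : Nat) (acc : List Char) :
    bToks (w ++ rest) gap acc = bToks rest gap (acc ++ w) := by
  induction w generalizing acc with
  | nil => simp
  | cons c w' ih =>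
    have hc : c ≠ ' ' := hw c (by simp)
    rw [List.cons_append, bToks, if_neg hc, ih (fun d hd => hw d (by simp [hd]))]
    simp

theorem bToks_cont (ts : List (Nat × List Char)) (hts : ∀ t ∈ ts, TokOK t) :
    ∀ (gap : Nat) (w : List Char), w ≠ [] →
      bToks (flatT ts) gap w = (gap, w) :: ts := by
  induction ts with
  | nil =>
    intro gap w hw
    simp [flatT, bToks, hw]
  | cons t rest ih =>
    intro gap w hw
    obtain ⟨g, nxt⟩ := t
    have htok := hts (g, nxt) (by simp)
    have hg : 1 ≤ g := htok.1
    obtain ⟨k, rfl⟩ : ∃ k, g = k + 1 := ⟨g - 1, by omega⟩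
    have hfl : flatT ((k + 1, nxt) :: rest) =
        ' ' :: (List.replicate k ' ' ++ (nxt ++ flatT rest)) := by
      simp [flatT, List.replicate_succ]
    rw [hfl, bToks, if_pos rfl, if_pos hw, bToks_spaces,
      bToks_word nxt (fun c hc => ne_space_of_isspace_false (htok.2.2 c hc)),
      List.nil_append, ih (fun x hx => hts x (by simp [hx])) _ nxt htok.2.1,
      show 1 + k = k + 1 from by omega]

theorem bToks_flat (w : List Char) (tl : List (Nat × List Char)) (hw : WordOK w)
    (htl : ∀ t ∈ tl, TokOK t) :
    bToks (w ++ flatT tl) 0 [] = (0, w) :: tl := by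
  rw [bToks_word w (fun c hc => ne_space_of_isspace_false (hw.2 c hc)), List.nil_append]
  exact bToks_cont tl htl 0 w hw.1

-- ---------- twChunks on a token decomposition (G2) ----------

theorem twChunks_head (c : Char) (cs : List Char) :
    ∃ ds gs, twChunks (c :: cs) = (c :: ds) :: gs := by
  cases h : twChunks cs with
  | nil => exact ⟨[], [], by rw [twChunks, h]⟩
  | cons grp gs =>
    cases grp with
    | nil => exact ⟨[], [] :: gs, by rw [twChunks, h]⟩
    | cons d ds =>
      by_cases hc : ((c == ' ') == (d == ' ')) = true
      · exact ⟨d :: ds, gs, by rw [twChunks, h]; simp [hc]⟩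
      · exact ⟨[], (d :: ds) :: gs, by rw [twChunks, h]; simp only [if_neg hc]⟩

theorem twChunks_word (w : List Char) (hne : w ≠ []) (hw : ∀ c ∈ w, c ≠ ' ')
    (t : List Char) (ht : t.head? = none ∨ t.head? = some ' ') :
    twChunks (w ++ t) = w :: twChunks t := by
  induction w with
  | nil => exact absurd rfl hne
  | cons c w' ih =>
    have hc : c ≠ ' ' := hw c (by simp)
    cases w' with
    | nil =>
      simp only [List.cons_append, List.nil_append]
      rcases ht with h0 | h0
      · have ht0 : t = [] := by
          cases t with
          | nil => rfl
          | cons a t' => simp at h0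
        subst ht0
        simp [twChunks]
      · cases t with
        | nil => simp at h0
        | cons a t' =>
          have ha : a = ' ' := by simpa using h0
          subst ha
          obtain ⟨ds, gs, hds⟩ := twChunks_head ' ' t'
          rw [twChunks, hds]
          simp [hc]
    | cons c2 w'' =>
      have h2 := ih (by simp) (fun d hd => hw d (List.mem_cons_of_mem c hd))
      rw [List.cons_append, twChunks, h2]
      have hc2 : c2 ≠ ' ' := hw c2 (by simp)
      simp [hc, hc2]

theorem twChunks_gap (g : Nat) (hg : 1 ≤ g) (t : List Char)
    (ht : ∀ c, t.head? = some c → c ≠ ' ') :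
    twChunks (List.replicate g ' ' ++ t) = List.replicate g ' ' :: twChunks t := by
  obtain ⟨k, rfl⟩ : ∃ k, g = k + 1 := ⟨g - 1, by omega⟩
  clear hg
  induction k with
  | zero =>
    simp only [List.replicate_succ, List.replicate_zero, List.cons_append, List.nil_append]
    cases t with
    | nil => simp [twChunks]
    | cons a t' =>
      have ha : a ≠ ' ' := ht a rfl
      obtain ⟨ds, gs, hds⟩ := twChunks_head a t'
      rw [twChunks, hds]
      simp [ha]
  | succ n ihn =>
    rw [show List.replicate (n + 1 + 1) ' ' = ' ' :: List.replicate (n + 1) ' ' from rfl,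
      List.cons_append, twChunks, ihn]
    rw [show List.replicate (n + 1) ' ' = ' ' :: List.replicate n ' ' from rfl]
    simp [List.replicate_succ]

theorem flatT_head (tl : List (Nat × List Char)) (htl : ∀ t ∈ tl, TokOK t) :
    (flatT tl).head? = none ∨ (flatT tl).head? = some ' ' := by
  cases tl with
  | nil => left; rfl
  | cons t rest =>
    right
    obtain ⟨g, w⟩ := t
    have hg := (htl (g, w) (by simp)).1
    obtain ⟨k, rfl⟩ : ∃ k, g = k + 1 := ⟨g - 1, by omega⟩
    simp [flatT, List.replicate_succ]

theorem twChunks_flatT (tl : List (Nat × List Char)) (htl : ∀ t ∈ tl, TokOK t) :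
    twChunks (flatT tl) = chunksT tl := by
  induction tl with
  | nil => rfl
  | cons t rest ih =>
    obtain ⟨g, w⟩ := t
    have htok := htl (g, w) (by simp)
    have hrest : ∀ x ∈ rest, TokOK x := fun x hx => htl x (by simp [hx])
    have hh : ∀ c, (w ++ flatT rest).head? = some c → c ≠ ' ' := by
      intro c hc
      cases w with
      | nil => exact absurd rfl htok.2.1
      | cons a w' =>
        simp only [List.cons_append, List.head?_cons, Option.some.injEq] at hc
        subst hc
        exact ne_space_of_isspace_false (htok.2.2 _ (by simp))
    have hfl : flatT ((g, w) :: rest) = List.replicate g ' ' ++ (w ++ flatT rest) := by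
      simp [flatT]
    rw [hfl, twChunks_gap g htok.1 _ hh,
      twChunks_word w htok.2.1 (fun c hc => ne_space_of_isspace_false (htok.2.2 c hc)) _
        (flatT_head rest hrest), ih hrest]
    simp [chunksT]

theorem twChunks_decomp (w : List Char) (tl : List (Nat × List Char)) (hw : WordOK w)
    (htl : ∀ t ∈ tl, TokOK t) :
    twChunks (w ++ flatT tl) = w :: chunksT tl := by
  rw [twChunks_word w hw.1 (fun c hc => ne_space_of_isspace_false (hw.2 c hc)) _
    (flatT_head tl htl), twChunks_flatT tl htl]

-- ---------- greedy correspondence (G5) ----------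

theorem greedy_corr (width : Int) :
    ∀ (ts : List (Nat × List Char)) (cur : Int), (∀ t ∈ ts, TokOK t) →
    ∃ pre post, ts = pre ++ post ∧
      bInner width ts cur = (pre.map (fun t => List.replicate t.1 ' ' ++ t.2), post) ∧
      (cur ≤ width → cur + tokLen pre ≤ width) ∧
      ((post = [] ∧ twGreedy width (chunksT ts) cur = (chunksT pre, [])) ∨
       (∃ g nxt rr, post = (g, nxt) :: rr ∧
         ((cur + tokLen pre + (g : Int) ≤ width ∧
            twGreedy width (chunksT ts) cur = (chunksT pre ++ [List.replicate g ' '], nxt :: chunksT rr)) ∨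
          (¬ (cur + tokLen pre + (g : Int) ≤ width) ∧
            twGreedy width (chunksT ts) cur = (chunksT pre, chunksT post))))) := by
  intro ts
  induction ts with
  | nil =>
    intro cur _
    exact ⟨[], [], rfl, rfl, by simp [tokLen], Or.inl ⟨rfl, by simp [chunksT, twGreedy]⟩⟩
  | cons t rest ih =>
    intro cur hts
    obtain ⟨g, nxt⟩ := t
    have htok := hts (g, nxt) (by simp)
    have hg : 1 ≤ g := htok.1
    have hrest : ∀ x ∈ rest, TokOK x := fun x hx => hts x (by simp [hx])
    have hch : chunksT ((g, nxt) :: rest) = List.replicate g ' ' :: nxt :: chunksT rest := by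
      simp [chunksT]
    by_cases hfit : width < cur + (g : Int) + (nxt.length : Int)
    · refine ⟨[], (g, nxt) :: rest, rfl, by rw [bInner, if_pos hfit]; rfl,
        by intro h; simpa [tokLen] using h, Or.inr ⟨g, nxt, rest, rfl, ?_⟩⟩
      by_cases hgap : cur + (g : Int) ≤ width
      · left
        refine ⟨by simpa [tokLen] using hgap, ?_⟩
        rw [hch, twGreedy, if_pos (by simpa using hgap), twGreedy,
          if_neg (by simp only [List.length_replicate]; omega)]
        simp [chunksT]
      · right
        refine ⟨by simpa [tokLen] using hgap, ?_⟩
        rw [hch, twGreedy, if_neg (by simpa using hgap)]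
        simp [chunksT]
    · push_neg at hfit
      obtain ⟨pre, post, hsp, hbi, hcw, hcases⟩ :=
        ih (cur + (g : Int) + (nxt.length : Int)) hrest
      have hbstep : bInner width ((g, nxt) :: rest) cur =
          (((g, nxt) :: pre).map (fun t => List.replicate t.1 ' ' ++ t.2), post) := by
        rw [bInner, if_neg (by omega)]
        simp [hbi]
      have htl : tokLen ((g, nxt) :: pre) = (g : Int) + (nxt.length : Int) + tokLen pre := by
        simp [tokLen]
      have hgstep : twGreedy width (chunksT ((g, nxt) :: rest)) cur =
          (List.replicate g ' ' :: nxt :: (twGreedy width (chunksT rest) (cur + (g : Int) + (nxt.length : Int))).1,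
           (twGreedy width (chunksT rest) (cur + (g : Int) + (nxt.length : Int))).2) := by
        rw [hch, twGreedy, if_pos (by simp; omega), twGreedy, if_pos (by simp; omega)]
        simp [add_assoc]
      refine ⟨(g, nxt) :: pre, post, by simp [hsp], hbstep, ?_, ?_⟩
      · intro _
        have h2 := hcw (by omega)
        rw [htl]
        omega
      · rcases hcases with ⟨hpost, hgr⟩ | ⟨g2, nxt2, rr, hpost, hcase⟩
        · left
          refine ⟨hpost, ?_⟩
          rw [hgstep, hgr]
          simp [chunksT, hsp, hpost]
        · right
          refine ⟨g2, nxt2, rr, hpost, ?_⟩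
          rcases hcase with ⟨hc1, hgr⟩ | ⟨hc1, hgr⟩
          · left
            refine ⟨by rw [htl]; omega, ?_⟩
            rw [hgstep, hgr]
            simp [chunksT]
          · right
            refine ⟨by rw [htl]; omega, ?_⟩
            rw [hgstep, hgr]
            simp [chunksT]

-- ---------- the outer loop (G4) ----------

theorem chunksT_getLast (ts : List (Nat × List Char)) (hne : ts ≠ []) (hts : ∀ t ∈ ts, TokOK t) :
    ∃ w, (chunksT ts).getLast? = some w ∧ WordOK w := by
  induction ts with
  | nil => exact absurd rfl hne
  | cons t rest ih =>
    obtain ⟨g, w⟩ := t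
    cases rest with
    | nil => exact ⟨w, by simp [chunksT], (hts (g, w) (by simp)).2⟩
    | cons t2 r2 =>
      obtain ⟨lw, h1, h2⟩ := ih (by simp) (fun x hx => hts x (by simp [hx]))
      refine ⟨lw, ?_, h2⟩
      rw [show chunksT ((g, w) :: t2 :: r2) = [List.replicate g ' ', w] ++ chunksT (t2 :: r2) from by
        simp [chunksT]]
      rw [List.getLast?_append_of_ne_nil _ (by simp [chunksT])]
      exact h1

theorem flatten_chunksT (ts : List (Nat × List Char)) :
    (chunksT ts).flatten = flatT ts := by
  induction ts with
  | nil => rfl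
  | cons t rest ih =>
    obtain ⟨g, w⟩ := t
    simp only [chunksT, flatT, List.flatMap_cons] at ih ⊢
    simp [List.flatten_append, ih, chunksT, flatT]

theorem flatten_parts (pre : List (Nat × List Char)) :
    (pre.map (fun t => List.replicate t.1 ' ' ++ t.2)).flatten = flatT pre := by
  induction pre with
  | nil => rfl
  | cons t rest ih =>
    simp only [List.map_cons, List.flatten_cons, flatT, List.flatMap_cons, ih]

theorem twWrapGo_nil (width : Int) (fuel : Nat) (lines : List String) :
    twWrapGo width fuel [] lines = lines := by
  cases fuel <;> rw [twWrapGo]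

theorem twWrapGo_gap_cons (width : Int) (fuel : Nat) (c d : List Char) (rs : List (List Char))
    (lines : List String) (hc : (PySem.Chars.strip c).isEmpty = true)
    (hd : (PySem.Chars.strip d).isEmpty = false) (hl : lines ≠ []) :
    twWrapGo width (fuel + 1) (c :: d :: rs) lines = twWrapGo width (fuel + 1) (d :: rs) lines := by
  have hcond1 : (!lines.isEmpty && (PySem.Chars.strip c).isEmpty) = true := by simp [hc, hl]
  have hcond2 : (!lines.isEmpty && (PySem.Chars.strip d).isEmpty) = false := by simp [hd]
  rw [twWrapGo, twWrapGo, hcond1, hcond2]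
  simp

theorem wrapGo_main (width : Int) :
    ∀ (n : Nat) (ts : List (Nat × List Char)) (fuel : Nat) (lines : List String),
      ts.length ≤ n → (∀ t ∈ ts, WordOK t.2) → (∀ t ∈ ts.tail, TokOK t) →
      ts.length + 1 ≤ fuel →
      (twWrapGo width fuel
          (match ts with
           | [] => []
           | (_, w) :: rest => w :: chunksT rest) lines = lines ++ aGreedy width ts) ∧
      ((∀ t ∈ ts, TokOK t) → lines ≠ [] →
        twWrapGo width fuel (chunksT ts) lines = lines ++ aGreedy width ts) := by
  intro n
  induction n with
  | zero =>
    intro ts fuel lines hlen _ _ hfuel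
    have h0 : ts = [] := by
      cases ts with
      | nil => rfl
      | cons a b => simp at hlen
    subst h0
    exact ⟨by simp [twWrapGo_nil, aGreedy],
      fun _ _ => by simp [chunksT, twWrapGo_nil, aGreedy]⟩
  | succ n ih =>
    intro ts fuel lines hlen hword htail hfuel
    cases ts with
    | nil =>
      exact ⟨by simp [twWrapGo_nil, aGreedy],
        fun _ _ => by simp [chunksT, twWrapGo_nil, aGreedy]⟩
    | cons t rest =>
      obtain ⟨g, w⟩ := t
      obtain ⟨fuel', rfl⟩ : ∃ f', fuel = f' + 1 := ⟨fuel - 1, by omega⟩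
      have hwOK : WordOK w := hword (g, w) (by simp)
      have hrest : ∀ x ∈ rest, TokOK x := fun x hx => htail x hx
      have hlen' : rest.length ≤ n := by simp at hlen; omega
      have hfuel' : rest.length + 1 ≤ fuel' := by simp at hfuel; omega
      have shape1 : ∀ lns : List String,
          twWrapGo width (fuel' + 1) (w :: chunksT rest) lns =
            lns ++ aGreedy width ((g, w) :: rest) := by
        intro lns
        by_cases hlong : width < (w.length : Int)
        · -- long word: goes alone on a line, char-chunked later
          have hgr : twGreedy width (w :: chunksT rest) 0 = ([], w :: chunksT rest) := by
            rw [twGreedy, if_neg (by omega)]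
          have hrec := (ih rest fuel' (lns ++ [String.ofList w]) hlen'
            (fun t ht => (hrest t ht).2) (fun t ht => hrest t (List.mem_of_mem_tail ht))
            hfuel').2 hrest (by simp)
          rw [twWrapGo,
            show (!lns.isEmpty && (PySem.Chars.strip w).isEmpty) = false from by
              simp [strip_wordOK hwOK]]
          simp only [Bool.false_eq_true, if_false]
          rw [hgr]
          simp [hlong, strip_wordOK hwOK, hrec, aGreedy]
        · -- w fits: greedy absorbs following tokens
          push_neg at hlong
          obtain ⟨pre, post, hsp, hbi, hcw, hcases⟩ :=
            greedy_corr width rest ((w.length : Int)) hrest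
          have hpost_sub : ∀ x ∈ post, TokOK x := fun x hx => hrest x (by rw [hsp]; simp [hx])
          have hlenpost : post.length ≤ n := by
            have := congrArg List.length hsp
            simp at this
            omega
          have hfuelpost : post.length + 1 ≤ fuel' := by
            have := congrArg List.length hsp
            simp at this
            omega
          have hkeep : ∀ (cs : List (List Char)), cs = w :: chunksT pre →
              ∃ lw, cs.getLast? = some lw ∧ (PySem.Chars.strip lw).isEmpty = false := by
            intro cs hcs
            subst hcs
            cases hp : pre with
            | nil => exact ⟨w, by simp [chunksT], strip_wordOK hwOK⟩
            | cons a b =>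
              obtain ⟨lw, h1, h2⟩ := chunksT_getLast pre (by rw [hp]; simp)
                (fun x hx => hrest x (by rw [hsp]; simp [hx]))
              refine ⟨lw, ?_, strip_wordOK h2⟩
              rw [show w :: chunksT (a :: b) = [w] ++ chunksT (a :: b) from rfl,
                List.getLast?_append_of_ne_nil _ (by simp [chunksT]), ← hp]
              exact h1
          rcases hcases with ⟨hpost, hG⟩ | ⟨g2, nxt2, rr, hpost, hcase⟩
          · -- everything fits on this line
            subst hpost
            have hpre : pre = rest := by simpa using hsp.symm
            subst hpre
            have hgr : twGreedy width (w :: chunksT pre) 0 = (w :: chunksT pre, []) := by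
              rw [twGreedy, if_pos (by omega), zero_add, hG]
            obtain ⟨lw, hl1, hl2⟩ := hkeep _ rfl
            rw [twWrapGo,
              show (!lns.isEmpty && (PySem.Chars.strip w).isEmpty) = false from by
                simp [strip_wordOK hwOK]]
            simp only [Bool.false_eq_true, if_false]
            rw [hgr]
            simp [hl1, hl2, twWrapGo_nil, aGreedy, not_lt.mpr hlong, hbi,
              flatten_parts, flatten_chunksT]
          · -- a break: either the gap was taken (and dropped) or not
            rcases hcase with ⟨hc1, hG⟩ | ⟨hc1, hG⟩
            · -- gap taken, dropped as trailing whitespace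
              have hgr : twGreedy width (w :: chunksT rest) 0 =
                  (w :: (chunksT pre ++ [List.replicate g2 ' ']), nxt2 :: chunksT rr) := by
                rw [twGreedy, if_pos (by omega), zero_add, hG]
              have hrec := (ih post fuel' (lns ++ [String.ofList w ++ String.ofList (flatT pre)])
                hlenpost (fun t ht => (hpost_sub t ht).2)
                (fun t ht => hpost_sub t (List.mem_of_mem_tail ht)) hfuelpost).1
              rw [hpost] at hrec
              have hlast : (w :: (chunksT pre ++ [List.replicate g2 ' '])).getLast? =
                  some (List.replicate g2 ' ') := by
                rw [show w :: (chunksT pre ++ [List.replicate g2 ' ']) =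
                    (w :: chunksT pre) ++ [List.replicate g2 ' '] from by simp,
                  List.getLast?_append_of_ne_nil _ (by simp)]
                rfl
              have hdrop : (w :: (chunksT pre ++ [List.replicate g2 ' '])).dropLast =
                  w :: chunksT pre := by
                rw [show w :: (chunksT pre ++ [List.replicate g2 ' ']) =
                    (w :: chunksT pre) ++ [List.replicate g2 ' '] from by simp,
                  List.dropLast_concat]
              rw [twWrapGo,
                show (!lns.isEmpty && (PySem.Chars.strip w).isEmpty) = false from by
                  simp [strip_wordOK hwOK]]
              simp only [Bool.false_eq_true, if_false]
              rw [hgr]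
              simp [hlast, hdrop, strip_replicate_space, flatten_chunksT, hrec, aGreedy,
                not_lt.mpr hlong, hbi, hpost, flatten_parts]
            · -- the gap itself did not fit: stays with the rest
              have hgr : twGreedy width (w :: chunksT rest) 0 =
                  (w :: chunksT pre, chunksT post) := by
                rw [twGreedy, if_pos (by omega), zero_add, hG]
              have hrec := (ih post fuel' (lns ++ [String.ofList w ++ String.ofList (flatT pre)])
                hlenpost (fun t ht => (hpost_sub t ht).2)
                (fun t ht => hpost_sub t (List.mem_of_mem_tail ht)) hfuelpost).2
                hpost_sub (by simp)
              obtain ⟨lw, hl1, hl2⟩ := hkeep _ rfl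
              rw [twWrapGo,
                show (!lns.isEmpty && (PySem.Chars.strip w).isEmpty) = false from by
                  simp [strip_wordOK hwOK]]
              simp only [Bool.false_eq_true, if_false]
              rw [hgr]
              have hcpost : chunksT post = List.replicate g2 ' ' :: nxt2 :: chunksT rr := by
                rw [hpost]; simp [chunksT]
              rw [hcpost]
              simp [hl1, hl2, flatten_chunksT, ← hcpost, hrec, aGreedy,
                not_lt.mpr hlong, hbi, flatten_parts]
      refine ⟨shape1 lines, fun hts hlines => ?_⟩
      have hg1 : 1 ≤ g := (hts (g, w) (by simp)).1
      rw [show chunksT ((g, w) :: rest) = List.replicate g ' ' :: w :: chunksT rest from by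
        simp [chunksT]]
      rw [twWrapGo_gap_cons width fuel' _ _ _ lines
        (by rw [strip_replicate_space]; rfl) (strip_wordOK hwOK) hlines]
      exact shape1 lines

-- ---------- the paragraph-level equality ----------

theorem chunksT_length (ts : List (Nat × List Char)) : (chunksT ts).length = 2 * ts.length := by
  induction ts with
  | nil => rfl
  | cons t rest ih => simp [chunksT] at ih ⊢; omega

theorem tokLen_eq_length (pre : List (Nat × List Char)) :
    tokLen pre = ((flatT pre).length : Int) := by
  induction pre with
  | nil => rfl
  | cons t r ih =>
    rw [show tokLen (t :: r) = (t.1 : Int) + (t.2.length : Int) + tokLen r from by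
      simp [tokLen], ih]
    simp only [flatT, List.flatMap_cons, List.length_append, List.length_replicate]
    push_cast
    ring

theorem aGreedy_ne_nil (width : Int) (ts : List (Nat × List Char)) (h : ts ≠ []) :
    aGreedy width ts ≠ [] := by
  cases ts with
  | nil => exact absurd rfl h
  | cons t rest =>
    obtain ⟨g, w⟩ := t
    rw [aGreedy]
    split <;> simp

theorem ofList_ne_empty (cs : List Char) (h : cs ≠ []) : String.ofList cs ≠ "" := by
  intro hc
  have h2 := congrArg String.toList hc
  simp at h2
  exact h h2

theorem twPieces_ne_nil (width : Int) (hw : 1 ≤ width) (line : String) : twPieces width line ≠ [] := by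
  unfold twPieces
  split
  · simp
  · rename_i h
    rw [not_le] at h
    have h0 : (0 : Int) ∈ PySem.List.pyRange 0 (PySem.Str.len line) width := by
      rw [PySem.List.mem_pyRange_iff_of_pos (by omega)]
      refine ⟨le_refl 0, by omega, by simp⟩
    simp only [ne_eq, List.map_eq_nil_iff]
    exact List.ne_nil_of_mem h0

theorem strSlice_ofList (w : List Char) (a b : Option Int) :
    PySem.Str.slice (String.ofList w) a b = String.ofList (PySem.List.slice w a b) := by
  apply String.toList_inj.mp
  simp [pysem]

theorem flatMap_twPieces (width : Int) (hw : 1 ≤ width) :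
    ∀ (ts : List (Nat × List Char)), (∀ t ∈ ts, WordOK t.2) → (∀ t ∈ ts.tail, TokOK t) →
    (aGreedy width ts).flatMap (twPieces width) = bGreedy width ts := by
  suffices H : ∀ (n : Nat) (ts : List (Nat × List Char)), ts.length ≤ n →
      (∀ t ∈ ts, WordOK t.2) → (∀ t ∈ ts.tail, TokOK t) →
      (aGreedy width ts).flatMap (twPieces width) = bGreedy width ts by
    intro ts h1 h2
    exact H ts.length ts le_rfl h1 h2
  intro n
  induction n with
  | zero =>
    intro ts hlen _ _
    have h0 : ts = [] := by
      cases ts with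
      | nil => rfl
      | cons a b => simp at hlen
    subst h0
    simp [aGreedy, bGreedy]
  | succ n ih =>
    intro ts hlen hword htail
    cases ts with
    | nil => simp [aGreedy, bGreedy]
    | cons t rest =>
      obtain ⟨g, w⟩ := t
      have hwOK : WordOK w := hword (g, w) (by simp)
      have hrest : ∀ x ∈ rest, TokOK x := htail
      by_cases hlong : width < (w.length : Int)
      · have hA : aGreedy width ((g, w) :: rest) = String.ofList w :: aGreedy width rest := by
          rw [aGreedy]
          simp [hlong]
        have hB : bGreedy width ((g, w) :: rest) = bChunkWord width w ++ bGreedy width rest := by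
          rw [bGreedy]
          simp [hlong]
        rw [hA, hB, List.flatMap_cons]
        congr 1
        · unfold twPieces bChunkWord
          rw [if_neg (by simp [PySem.Str.len]; omega)]
          rw [show PySem.Str.len (String.ofList w) = (w.length : Int) from by simp [PySem.Str.len]]
          exact List.map_congr_left (fun m _ => strSlice_ofList w (some m) (some (m + width)))
        · exact ih rest (by simp at hlen; omega) (fun t ht => (hrest t ht).2)
            (fun t ht => hrest t (List.mem_of_mem_tail ht))
      · have hA : aGreedy width ((g, w) :: rest) =
            String.ofList (w :: (bInner width rest (w.length : Int)).1).flatten ::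
              aGreedy width (bInner width rest (w.length : Int)).2 := by
          rw [aGreedy]
          simp [hlong]
        have hB : bGreedy width ((g, w) :: rest) =
            String.ofList (w :: (bInner width rest (w.length : Int)).1).flatten ::
              bGreedy width (bInner width rest (w.length : Int)).2 := by
          rw [bGreedy]
          simp [hlong]
        obtain ⟨pre, post, hsp, hbi, hcw, _⟩ := greedy_corr width rest ((w.length : Int)) hrest
        have hfit : PySem.Str.len (String.ofList (w :: (bInner width rest (w.length : Int)).1).flatten) ≤ width := by
          rw [hbi]
          simp only [PySem.Str.len]
          simp only [List.flatten_cons, flatten_parts]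
          have h1 := hcw (by omega)
          have h2 := tokLen_eq_length pre
          simp
          omega
        rw [hA, hB, List.flatMap_cons]
        rw [show twPieces width (String.ofList (w :: (bInner width rest (w.length : Int)).1).flatten) =
            [String.ofList (w :: (bInner width rest (w.length : Int)).1).flatten] from by
          unfold twPieces; rw [if_pos hfit]]
        rw [List.singleton_append]
        congr 1
        have hpost_len : post.length ≤ rest.length := by
          have := congrArg List.length hsp
          simp at this
          omega
        have h2 : (bInner width rest (w.length : Int)).2 = post := by rw [hbi]
        rw [h2]
        exact ih post (by simp at hlen; omega)
          (fun t ht => (hrest t (by rw [hsp]; simp [ht])).2)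
          (fun t ht => hrest t (by rw [hsp]; simp [List.mem_of_mem_tail ht]))

theorem bInner_snd_mem (width : Int) :
    ∀ (ts : List (Nat × List Char)) (cur : Int) (t : Nat × List Char),
      t ∈ (bInner width ts cur).2 → t ∈ ts := by
  intro ts
  induction ts with
  | nil => intro cur t ht; simp [bInner] at ht
  | cons x rest ih =>
    intro cur t ht
    obtain ⟨g, nxt⟩ := x
    rw [bInner] at ht
    split at ht
    · exact ht
    · exact List.mem_cons_of_mem _ (ih _ t ht)

theorem bGreedy_lines_ne_empty (width : Int) (hw : 1 ≤ width) :
    ∀ (ts : List (Nat × List Char)), (∀ t ∈ ts, WordOK t.2) →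
    ∀ l ∈ bGreedy width ts, l ≠ "" := by
  suffices H : ∀ (n : Nat) (ts : List (Nat × List Char)), ts.length ≤ n →
      (∀ t ∈ ts, WordOK t.2) → ∀ l ∈ bGreedy width ts, l ≠ "" by
    intro ts h1
    exact H ts.length ts le_rfl h1
  intro n
  induction n with
  | zero =>
    intro ts hlen _ l hl
    have h0 : ts = [] := by
      cases ts with
      | nil => rfl
      | cons a b => simp at hlen
    subst h0
    simp [bGreedy] at hl
  | succ n ih =>
    intro ts hlen hword l hl
    cases ts with
    | nil => simp [bGreedy] at hl
    | cons t rest =>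
      obtain ⟨g, w⟩ := t
      have hwOK : WordOK w := hword (g, w) (by simp)
      by_cases hlong : width < (w.length : Int)
      · rw [show bGreedy width ((g, w) :: rest) = bChunkWord width w ++ bGreedy width rest from by
          rw [bGreedy]; simp [hlong]] at hl
        rcases List.mem_append.mp hl with h1 | h1
        · unfold bChunkWord at h1
          obtain ⟨m, hm, rfl⟩ := List.mem_map.mp h1
          rw [PySem.List.mem_pyRange_iff_of_pos (by omega)] at hm
          obtain ⟨hm0, hm1, _⟩ := hm
          apply ofList_ne_empty
          rw [PySem.List.slice_toNat w (by omega) (by omega)]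
          intro hcontra
          have hlen2 := congrArg List.length hcontra
          simp only [List.length_take, List.length_drop, List.length_nil] at hlen2
          omega
        · exact ih rest (by simp at hlen; omega) (fun t ht => hword t (by simp [ht])) l h1
      · rw [show bGreedy width ((g, w) :: rest) =
            String.ofList (w :: (bInner width rest (w.length : Int)).1).flatten ::
              bGreedy width (bInner width rest (w.length : Int)).2 from by
          rw [bGreedy]; simp [hlong]] at hl
        rcases List.mem_cons.mp hl with h1 | h1
        · subst h1
          apply ofList_ne_empty
          simp only [List.flatten_cons]
          intro hcontra
          exact hwOK.1 (List.append_eq_nil_iff.mp hcontra).1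
        · have hsub := bInner_snd_length_le width rest ((w.length : Int))
          exact ih (bInner width rest (w.length : Int)).2 (by simp at hlen; omega)
            (fun t ht => hword t (List.mem_cons_of_mem _ (bInner_snd_mem width rest _ t ht)))
            l h1

-- paragraph hypotheses: non-empty, Dom characters, non-space first/last char
def ParaOK (p : String) : Prop :=
  p.toList ≠ [] ∧ (∀ c ∈ p.toList, pvDomChar c = true) ∧
  (∀ c, p.toList.head? = some c → PySem.Chars.isspace c = false) ∧
  (∀ c, p.toList.getLast? = some c → PySem.Chars.isspace c = false)

theorem wrapParagraph_eq_bFill (p : String) (width : Int) (hw : 1 ≤ width) (hp : ParaOK p) :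
    wrapParagraph p width = bFill p width ∧ bFill p width ≠ [] ∧ ∀ l ∈ bFill p width, l ≠ "" := by
  obtain ⟨hne, hdom, hh, hl⟩ := hp
  have hpne : p ≠ "" := by
    intro h
    subst h
    simp at hne
  have hmne : twMunge p.toList ≠ [] := twMunge_ne_nil _ hne
  have hmh : ∀ c, (twMunge p.toList).head? = some c → c ≠ ' ' := by
    intro c hc
    cases hp0 : p.toList with
    | nil => exact absurd hp0 hne
    | cons c0 t =>
      have h0 : PySem.Chars.isspace c0 = false := hh c0 (by rw [hp0]; rfl)
      rw [hp0, twMunge_head c0 t h0] at hc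
      injection hc with hc2
      rw [← hc2]
      exact ne_space_of_isspace_false h0
  have hml : ∀ c, (twMunge p.toList).getLast? = some c → c ≠ ' ' := by
    intro c hc
    rw [twMunge_getLast p.toList hne hl] at hc
    exact ne_space_of_isspace_false (hl c hc)
  obtain ⟨w, tl, hdecomp, hwOK, htl⟩ :=
    toks_exist (twMunge p.toList) hmne (twMunge_ws_eq_space p.toList hdom) hmh hml
  have hwords : ∀ t ∈ (0, w) :: tl, WordOK t.2 := by
    intro t ht
    rcases List.mem_cons.mp ht with h1 | h1
    · subst h1; exact hwOK
    · exact (htl t h1).2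
  have htail : ∀ t ∈ ((0, w) :: tl).tail, TokOK t := htl
  have hCh : twChunks (twMunge p.toList) = w :: chunksT tl := by
    rw [hdecomp]
    exact twChunks_decomp w tl hwOK htl
  have hBt : bToks (twMunge p.toList) 0 [] = (0, w) :: tl := by
    rw [hdecomp]
    exact bToks_flat w tl hwOK htl
  have hmain2 : twWrapGo width ((w :: chunksT tl).length + 1) (w :: chunksT tl) [] =
      aGreedy width ((0, w) :: tl) := by
    have hmain := (wrapGo_main width ((0, w) :: tl).length ((0, w) :: tl)
      ((w :: chunksT tl).length + 1) [] le_rfl hwords htail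
      (by simp [chunksT_length]; omega)).1
    simpa using hmain
  have hAside : wrapParagraph p width = (aGreedy width ((0, w) :: tl)).flatMap (twPieces width) := by
    unfold wrapParagraph
    rw [if_neg hpne]
    simp only [hCh]
    rw [hmain2]
    rw [if_neg (aGreedy_ne_nil width ((0, w) :: tl) (by simp))]
    rw [PySem.List.foldl_append_eq_flatMap (twPieces width), List.nil_append]
  have hBside : bFill p width = bGreedy width ((0, w) :: tl) := by
    unfold bFill
    rw [hBt]
  refine ⟨?_, ?_, ?_⟩
  · rw [hAside, hBside]
    exact flatMap_twPieces width hw ((0, w) :: tl) hwords htail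
  · rw [hBside, ← flatMap_twPieces width hw ((0, w) :: tl) hwords htail]
    cases hA : aGreedy width ((0, w) :: tl) with
    | nil => exact absurd hA (aGreedy_ne_nil width _ (by simp))
    | cons a as =>
      rw [List.flatMap_cons]
      intro hc
      exact twPieces_ne_nil width hw a (List.append_eq_nil_iff.mp hc).1
  · rw [hBside]
    exact bGreedy_lines_ne_empty width hw ((0, w) :: tl) hwords

theorem emitParaA_eq (indent : String) (width : Int) (hw : 1 ≤ width) (p : String) (hp : ParaOK p) :
    emitParaA indent width p = (bFill p width).map (fun l => indent ++ "# " ++ l) := by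
  obtain ⟨heq, hne, hlines⟩ := wrapParagraph_eq_bFill p width hw hp
  have hpne : p ≠ "" := by
    intro h
    subst h
    exact hp.1 (by simp)
  unfold emitParaA
  rw [if_neg hpne, heq, if_neg hne]
  apply List.map_congr_left
  intro l hl
  unfold wrapLine
  rw [if_pos (hlines l hl)]

theorem emitParaA_blank (indent : String) (width : Int) :
    emitParaA indent width "" = [indent ++ "#"] := by
  simp [emitParaA]

-- ---------- string-side facts for paragraphs built by " ".join ----------

theorem mem_strip_subset (l : List Char) (c : Char) (hc : c ∈ PySem.Chars.strip l) : c ∈ l := by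
  unfold PySem.Chars.strip PySem.Chars.rstrip PySem.Chars.lstrip at hc
  have h1 := (List.dropWhile_suffix _).subset (List.mem_reverse.mp hc)
  rw [List.mem_reverse] at h1
  exact (List.dropWhile_suffix _).subset h1

theorem head?_prefix_of_ne_nil {α : Type} {r l : List α} (h : r <+: l) (hr : r ≠ []) :
    l.head? = r.head? := by
  obtain ⟨t, rfl⟩ := h
  cases r with
  | nil => exact absurd rfl hr
  | cons a b => rfl

theorem strip_paraOK (s : String) (hdom : ∀ c ∈ s.toList, pvDomChar c = true)
    (hne : PySem.Str.strip s ≠ "") : ParaOK (PySem.Str.strip s) := by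
  have htl : (PySem.Str.strip s).toList = PySem.Chars.strip s.toList := by
    simp [PySem.Str.strip]
  have hne' : PySem.Chars.strip s.toList ≠ [] := by
    intro h
    apply hne
    apply String.toList_inj.mp
    rw [htl, h]
    rfl
  refine ⟨by rw [htl]; exact hne', ?_, ?_, ?_⟩
  · intro c hc
    rw [htl] at hc
    exact hdom c (mem_strip_subset _ c hc)
  · intro c hc
    rw [htl] at hc
    unfold PySem.Chars.strip at hc hne'
    have hpref : PySem.Chars.rstrip (PySem.Chars.lstrip s.toList) <+: PySem.Chars.lstrip s.toList := by
      unfold PySem.Chars.rstrip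
      obtain ⟨t, ht⟩ :=
        List.dropWhile_suffix (p := PySem.Chars.isspace) (l := (PySem.Chars.lstrip s.toList).reverse)
      exact ⟨t.reverse, by rw [← List.reverse_append, ht, List.reverse_reverse]⟩
    have hh2 : (PySem.Chars.lstrip s.toList).head? = some c := by
      rw [head?_prefix_of_ne_nil hpref hne']
      exact hc
    cases hl1c : PySem.Chars.lstrip s.toList with
    | nil => rw [hl1c] at hh2; simp at hh2
    | cons a b =>
      rw [hl1c] at hh2
      simp only [List.head?_cons, Option.some.injEq] at hh2
      subst hh2
      exact head_dropWhile_false _ s.toList _ b hl1c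
  · intro c hc
    rw [htl] at hc
    unfold PySem.Chars.strip PySem.Chars.rstrip at hc
    rw [List.getLast?_reverse] at hc
    cases hdw : List.dropWhile PySem.Chars.isspace (PySem.Chars.lstrip s.toList).reverse with
    | nil => rw [hdw] at hc; simp at hc
    | cons a b =>
      rw [hdw] at hc
      simp only [List.head?_cons, Option.some.injEq] at hc
      subst hc
      exact head_dropWhile_false _ _ _ b hdw

theorem join_paraOK (parts : List String) (hne : parts ≠ []) (hall : ∀ s ∈ parts, ParaOK s) :
    ParaOK (PySem.Str.join " " parts) := by
  induction parts with
  | nil => exact absurd rfl hne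
  | cons x xs ih =>
    cases xs with
    | nil =>
      have hx1 : PySem.Str.join " " [x] = x := by
        apply String.toList_inj.mp
        simp [PySem.Str.join, PySem.Chars.join_singleton]
      rw [hx1]
      exact hall x (by simp)
    | cons y rest =>
      have hx := hall x (by simp)
      have hihOK := ih (by simp) (fun s hs => hall s (by simp [hs]))
      have hjoin : (PySem.Str.join " " (x :: y :: rest)).toList =
          x.toList ++ (' ' :: (PySem.Str.join " " (y :: rest)).toList) := by
        simp [PySem.Str.join, PySem.Chars.join_cons_cons]
      refine ⟨?_, ?_, ?_, ?_⟩
      · rw [hjoin]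
        simp
      · intro c hc
        rw [hjoin] at hc
        rcases List.mem_append.mp hc with h1 | h1
        · exact hx.2.1 c h1
        · rcases List.mem_cons.mp h1 with h2 | h2
          · subst h2; decide
          · exact hihOK.2.1 c h2
      · intro c hc
        rw [hjoin] at hc
        rw [head?_prefix_of_ne_nil (l := x.toList ++ (' ' :: (PySem.Str.join " " (y :: rest)).toList))
          ⟨_, rfl⟩ hx.1] at hc
        exact hx.2.2.1 c hc
      · intro c hc
        rw [hjoin] at hc
        rw [List.getLast?_append_of_ne_nil _ (by simp)] at hc
        rw [show (' ' :: (PySem.Str.join " " (y :: rest)).toList) =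
            [' '] ++ (PySem.Str.join " " (y :: rest)).toList from rfl,
          List.getLast?_append_of_ne_nil _ hihOK.1] at hc
        exact hihOK.2.2.2 c hc

-- ---------- top-level: A's two loops vs B's index scan ----------

-- A's first loop restated over the pre-stripped lines
def stepA' (pb : List String × List String) (x : String) : List String × List String :=
  if x ≠ "" then (pb.1, pb.2 ++ [x]) else (pb.1 ++ flushP pb.2 ++ [""], [])

def parasOf (ls : List String) (buf : List String) : List String :=
  (ls.foldl stepA' ([], buf)).1 ++ flushP (ls.foldl stepA' ([], buf)).2

theorem foldl_stepA_eq (ls : List String) (pb : List String × List String) :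
    ls.foldl stepA pb = (ls.map PySem.Str.strip).foldl stepA' pb := by
  rw [List.foldl_map]
  rfl

theorem foldl_stepA'_prefix : ∀ (ls : List String) (paras buf : List String),
    ls.foldl stepA' (paras, buf) = (paras ++ (ls.foldl stepA' ([], buf)).1, (ls.foldl stepA' ([], buf)).2) := by
  intro ls
  induction ls with
  | nil => intro paras buf; simp
  | cons x xs ih =>
    intro paras buf
    simp only [List.foldl_cons]
    by_cases h : x = ""
    · rw [show stepA' (paras, buf) x = (paras ++ (flushP buf ++ [""]), []) from by
          simp [stepA', h],
        show stepA' ([], buf) x = (flushP buf ++ [""], []) from by simp [stepA', h]]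
      rw [ih (paras ++ (flushP buf ++ [""])) [], ih (flushP buf ++ [""]) []]
      simp
    · rw [show stepA' (paras, buf) x = (paras, buf ++ [x]) from by simp [stepA', h],
        show stepA' ([], buf) x = ([], buf ++ [x]) from by simp [stepA', h]]
      exact ih paras _

theorem parasOf_cons_blank (xs : List String) (buf : List String) :
    parasOf ("" :: xs) buf = (flushP buf ++ [""]) ++ parasOf xs [] := by
  unfold parasOf
  simp only [List.foldl_cons,
    show stepA' ([], buf) "" = (flushP buf ++ [""], []) from by simp [stepA']]
  rw [foldl_stepA'_prefix xs (flushP buf ++ [""]) []]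
  simp

theorem parasOf_cons_word (x : String) (xs : List String) (buf : List String) (h : x ≠ "") :
    parasOf (x :: xs) buf = parasOf xs (buf ++ [x]) := by
  unfold parasOf
  simp only [List.foldl_cons,
    show stepA' ([], buf) x = ([], buf ++ [x]) from by simp [stepA', h]]

theorem parasOf_run : ∀ (run : List String), (∀ x ∈ run, x ≠ "") →
    ∀ (rest buf : List String), parasOf (run ++ rest) buf = parasOf rest (buf ++ run) := by
  intro run
  induction run with
  | nil => intro _ rest buf; simp
  | cons x run' ih =>
    intro hrun rest buf
    rw [List.cons_append, parasOf_cons_word x _ buf (hrun x (by simp)),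
      ih (fun y hy => hrun y (by simp [hy])) rest (buf ++ [x])]
    simp

theorem parasOf_ne_nil : ∀ (ls : List String) (buf : List String), ls ≠ [] ∨ buf ≠ [] → parasOf ls buf ≠ [] := by
  intro ls
  induction ls with
  | nil =>
    intro buf h
    have hb : buf ≠ [] := h.resolve_left (by simp)
    simp [parasOf, flushP, hb]
  | cons x xs ih =>
    intro buf _
    by_cases h : x = ""
    · subst h
      rw [parasOf_cons_blank]
      simp
    · rw [parasOf_cons_word x xs buf h]
      exact ih _ (Or.inr (by simp))

theorem main_scan (indent : String) (width : Int) (hw : 1 ≤ width) :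
    ∀ (sl : List String), (∀ s ∈ sl, s ≠ "" → ParaOK s) →
      (parasOf sl []).flatMap (emitParaA indent width) = bScan indent width sl := by
  suffices H : ∀ (n : Nat) (sl : List String), sl.length ≤ n → (∀ s ∈ sl, s ≠ "" → ParaOK s) →
      (parasOf sl []).flatMap (emitParaA indent width) = bScan indent width sl by
    intro sl h
    exact H sl.length sl le_rfl h
  intro n
  induction n with
  | zero =>
    intro sl hlen _
    have h0 : sl = [] := by
      cases sl with
      | nil => rfl
      | cons a b => simp at hlen
    subst h0
    rw [show bScan indent width [] = [] from by rw [bScan]]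
    simp [parasOf, flushP]
  | succ n ih =>
    intro sl hlen hOK
    cases sl with
    | nil =>
      rw [show bScan indent width [] = [] from by rw [bScan]]
      simp [parasOf, flushP]
    | cons s rest =>
      by_cases hs : s = ""
      · subst hs
        rw [parasOf_cons_blank,
          show bScan indent width ("" :: rest) = (indent ++ "#") :: bScan indent width rest from by
            rw [bScan]; simp]
        rw [List.flatMap_append]
        rw [ih rest (by simp at hlen; omega) (fun x hx h => hOK x (by simp [hx]) h)]
        simp [flushP, emitParaA_blank]
      · have hsplit : (s :: rest).takeWhile (· ≠ "") ++ (s :: rest).dropWhile (· ≠ "") = s :: rest :=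
          List.takeWhile_append_dropWhile
        set run := (s :: rest).takeWhile (· ≠ "") with hrundef
        set rest' := (s :: rest).dropWhile (· ≠ "") with hrestdef
        have hrun_ne : run ≠ [] := by
          rw [hrundef, List.takeWhile_cons_of_pos (by simp [hs])]
          simp
        have hrun_all : ∀ x ∈ run, x ≠ "" := by
          intro x hx
          have := List.mem_takeWhile_imp hx
          simpa using this
        have hrun_len : 1 ≤ run.length := by
          cases hrc : run with
          | nil => exact absurd hrc hrun_ne
          | cons a b => simp [hrc]
        have hlen' : rest'.length ≤ n := by
          have h2 := congrArg List.length hsplit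
          simp only [List.length_append, List.length_cons] at h2
          simp at hlen
          omega
        have hOK' : ∀ x ∈ rest', x ≠ "" → ParaOK x := by
          intro x hx h
          exact hOK x ((List.dropWhile_suffix _).subset hx) h
        have hrunOK : ∀ x ∈ run, ParaOK x := by
          intro x hx
          exact hOK x ((List.takeWhile_prefix _).subset hx) (hrun_all x hx)
        have hjOK : ParaOK (PySem.Str.join " " run) := join_paraOK run hrun_ne hrunOK
        have hA1 : parasOf (s :: rest) [] = flushP run ++ parasOf rest' [] := by
          conv_lhs => rw [← hsplit]
          rw [parasOf_run run hrun_all rest' []]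
          simp only [List.nil_append]
          cases hr' : rest' with
          | nil => simp [parasOf, flushP]
          | cons a rtail =>
            have ha : a = "" := by
              have := head_dropWhile_false (fun x => decide (x ≠ "")) (s :: rest) a rtail
                (by rw [← hrestdef]; exact hr')
              simpa using this
            subst ha
            rw [parasOf_cons_blank, parasOf_cons_blank]
            simp [flushP]
        rw [hA1, List.flatMap_append,
          ih rest' hlen' hOK',
          show bScan indent width (s :: rest) =
            ((bFill (PySem.Str.join " " run) width).map (fun l => indent ++ "# " ++ l)) ++
              bScan indent width rest' from by rw [bScan, if_neg hs]]
        congr 1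
        rw [show flushP run = [joinBuf run] from by simp [flushP, hrun_ne]]
        rw [List.flatMap_cons]
        simp only [List.flatMap_nil, List.append_nil]
        exact emitParaA_eq indent width hw _ hjOK

theorem blank_scan (indent : String) (width : Int) :
    ∀ (sl : List String), (∀ s ∈ sl, s = "") →
      (parasOf sl []).flatMap (emitParaA indent width) = bScan indent width sl := by
  intro sl
  induction sl with
  | nil =>
    intro _
    rw [show bScan indent width [] = [] from by rw [bScan]]
    simp [parasOf, flushP]
  | cons s rest ih =>
    intro hall
    have hs : s = "" := hall s (by simp)
    subst hs
    rw [parasOf_cons_blank,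
      show bScan indent width ("" :: rest) = (indent ++ "#") :: bScan indent width rest from by
        rw [bScan]; simp]
    rw [List.flatMap_append, ih (fun x hx => hall x (by simp [hx]))]
    simp [flushP, emitParaA_blank]

theorem splitOn_go_ne_nil (sep : List Char) : ∀ (fuel : Nat) (l cur : List Char) (acc : List (List Char)),
    PySem.Chars.splitOn.go sep fuel l cur acc ≠ [] := by
  intro fuel
  induction fuel with
  | zero => intro l cur acc; simp [PySem.Chars.splitOn.go]
  | succ n ih =>
    intro l cur acc
    cases l with
    | nil => simp [PySem.Chars.splitOn.go]
    | cons c rest =>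
      rw [PySem.Chars.splitOn.go]
      split <;> apply ih

theorem splitOn_go_mem (sep : List Char) :
    ∀ (fuel : Nat) (l cur : List Char) (acc : List (List Char)) (p : List Char),
      p ∈ PySem.Chars.splitOn.go sep fuel l cur acc →
      ∀ c ∈ p, c ∈ l ∨ c ∈ cur ∨ ∃ q ∈ acc, c ∈ q := by
  intro fuel
  induction fuel with
  | zero =>
    intro l cur acc p hp c hc
    rw [PySem.Chars.splitOn.go, List.mem_reverse] at hp
    rcases List.mem_cons.mp hp with h1 | h1
    · subst h1
      rcases List.mem_append.mp hc with h2 | h2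
      · exact Or.inr (Or.inl (List.mem_reverse.mp h2))
      · exact Or.inl h2
    · exact Or.inr (Or.inr ⟨p, h1, hc⟩)
  | succ n ih =>
    intro l cur acc p hp c hc
    cases l with
    | nil =>
      have hgo : PySem.Chars.splitOn.go sep (n + 1) [] cur acc = (cur.reverse :: acc).reverse := by
        rw [PySem.Chars.splitOn.go]
        omega
      rw [hgo, List.mem_reverse] at hp
      rcases List.mem_cons.mp hp with h1 | h1
      · subst h1
        exact Or.inr (Or.inl (List.mem_reverse.mp hc))
      · exact Or.inr (Or.inr ⟨p, h1, hc⟩)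
    | cons c0 rest =>
      rw [PySem.Chars.splitOn.go] at hp
      split at hp
      · rcases ih _ _ _ p hp c hc with h1 | h1 | ⟨q, hq, hcq⟩
        · exact Or.inl (List.mem_of_mem_drop h1)
        · simp at h1
        · rcases List.mem_cons.mp hq with h2 | h2
          · subst h2
            exact Or.inr (Or.inl (List.mem_reverse.mp hcq))
          · exact Or.inr (Or.inr ⟨q, h2, hcq⟩)
      · rcases ih _ _ _ p hp c hc with h1 | h1 | ⟨q, hq, hcq⟩
        · exact Or.inl (List.mem_cons_of_mem _ h1)
        · rcases List.mem_cons.mp h1 with h2 | h2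
          · exact Or.inl (h2 ▸ List.mem_cons_self)
          · exact Or.inr (Or.inl h2)
        · exact Or.inr (Or.inr ⟨q, hq, hcq⟩)

theorem pyLines_ne_nil (text : String) : pyLines text ≠ [] := by
  unfold pyLines PySem.Str.split?
  rw [show ("\n" : String).toList = ['\n'] from rfl]
  simp only [PySem.Chars.split?, PySem.Chars.splitOn, List.isEmpty_cons, Bool.false_eq_true,
    if_false, Option.map_some, Option.getD_some, ne_eq, List.map_eq_nil_iff]
  exact splitOn_go_ne_nil _ _ _ _ _

theorem pyLines_dom (text : String) (hdom : pvDomStr text = true) :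
    ∀ l ∈ pyLines text, pvDomStr l = true := by
  intro l hl
  unfold pyLines PySem.Str.split? at hl
  rw [show ("\n" : String).toList = ['\n'] from rfl] at hl
  simp only [PySem.Chars.split?, PySem.Chars.splitOn, List.isEmpty_cons, Bool.false_eq_true,
    if_false, Option.map_some, Option.getD_some, List.mem_map] at hl
  obtain ⟨p, hp, rfl⟩ := hl
  have hmem := splitOn_go_mem ['\n'] (text.toList.length + 1) text.toList [] [] p hp
  unfold pvDomStr at hdom ⊢
  rw [List.all_eq_true]
  intro c hc
  rw [show (String.ofList p).toList = p from by simp] at hc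
  rcases hmem c hc with h1 | h1 | ⟨q, hq, _⟩
  · exact List.all_eq_true.mp hdom c h1
  · simp at h1
  · simp at hq

-- ===== VERDICT (by name: the statement is the Claim_ definition above) =====
theorem wrap_comment_text_py_spec : Claim_equal_wrap_comment_text_py := by
  intro text indent width hdom hpre
  unfold Spec_wrap_comment_text_py wrap_comment_text_py wrap_comment_text_py_alt
  have hdomtext : pvDomStr text = true := by
    unfold Dom_wrap_comment_text_py at hdom
    cases h : pvDomStr text
    · rw [h] at hdom
      simp at hdom
    · rfl
  rw [foldl_stepA_eq]
  have hne : parasOf ((pyLines text).map PySem.Str.strip) [] ≠ [] :=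
    parasOf_ne_nil _ _ (Or.inl (by simp [pyLines_ne_nil text]))
  change (if parasOf ((pyLines text).map PySem.Str.strip) [] = [] then [""]
      else parasOf ((pyLines text).map PySem.Str.strip) []).foldl
      (fun wrapped p => wrapped ++ emitParaA indent width p) []
    = bScan indent width ((pyLines text).map PySem.Str.strip)
  rw [if_neg hne]
  rw [PySem.List.foldl_append_eq_flatMap (emitParaA indent width), List.nil_append]
  rcases hpre with hw | hblank
  · apply main_scan indent width hw
    intro s hs hne2
    obtain ⟨l, hl, rfl⟩ := List.mem_map.mp hs
    refine strip_paraOK l ?_ hne2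
    intro c hc
    have hdl := pyLines_dom text hdomtext l hl
    unfold pvDomStr at hdl
    exact List.all_eq_true.mp hdl c hc
  · apply blank_scan
    intro s hs
    obtain ⟨l, hl, rfl⟩ := List.mem_map.mp hs
    exact hblank l hl
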